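-- pv_equiv track=rewrite | github.com/DiscoveryPiscine42Bangkok2025/discovery-piscine-coding-with-python-2026-nkarGn | miniproject/ex00/checkmate.py | bishop_rewrite
-- ===== SOURCE A (Python) =====
-- def bishop_rewrite(new_board, bishop_r, bishop_c):
--     board_rows = len(new_board)
--     board_cols = len(new_board[0])
--
--     for i in range(board_rows):
--         for j in range(board_cols):
--             if abs(bishop_r - i) == abs(bishop_c - j):
--                 if not (i == bishop_r and j == bishop_c):
--                     new_board[i][j] = 'X' if new_board[i][j] not in ['R', 'Q', 'P', 'B'] else new_board[i][j]
--     return new_board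
-- ===== SOURCE B (Python) =====
-- def bishop_rewrite(new_board, bishop_r, bishop_c):
--     cols = len(new_board[0])
--     keep = {'R', 'Q', 'P', 'B'}
--     for i, row in enumerate(new_board):
--         d = i - bishop_r
--         for j in (bishop_c + d, bishop_c - d):
--             if 0 <= j < cols and d != 0 and row[j] not in keep:
--                 row[j] = 'X'
--     return new_board
-- ===== Notes on version B (the rewrite author's own statement) =====
-- stated objective: alternative
-- what changed: Instead of scanning every cell of the board and testing the diagonal equation, B visits each row once and computes the (at most two) diagonal columns bc+(i-br) and bc-(i-br) in closed form, so the inner column loop disappears (O(R) index work instead of O(R*C) tests; measured only ~1.2-1.9x on the generated boards, so no speed claim).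
import Mathlib
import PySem

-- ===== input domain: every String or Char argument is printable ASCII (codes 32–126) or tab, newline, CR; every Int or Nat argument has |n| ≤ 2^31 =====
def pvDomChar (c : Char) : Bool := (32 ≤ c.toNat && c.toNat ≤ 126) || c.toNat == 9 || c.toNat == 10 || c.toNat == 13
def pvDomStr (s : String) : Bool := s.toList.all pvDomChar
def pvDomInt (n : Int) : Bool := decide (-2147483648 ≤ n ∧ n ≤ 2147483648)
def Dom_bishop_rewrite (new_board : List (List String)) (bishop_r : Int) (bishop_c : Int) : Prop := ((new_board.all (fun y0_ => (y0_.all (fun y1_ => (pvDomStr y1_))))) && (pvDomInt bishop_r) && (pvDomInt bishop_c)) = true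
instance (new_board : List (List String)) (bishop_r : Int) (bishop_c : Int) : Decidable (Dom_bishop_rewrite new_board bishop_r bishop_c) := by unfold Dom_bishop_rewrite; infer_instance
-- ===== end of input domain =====

-- B replaces A's full-board scan (every cell tested against the diagonal equation) by a
-- per-row closed form for the (at most two) diagonal columns, removing the inner column
-- loop (objective: alternative). Both A and B mutate the board in place in Python, in the
-- same way; the equivalence proved here is about the returned value.

-- ===== PORT A =====
def bishop_rewrite (new_board : List (List String)) (bishop_r : Int) (bishop_c : Int) : List (List String) :=
  let board_rows : Int := new_board.length
  let board_cols : Int := (PySem.List.pyGetD new_board 0 []).length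
  (PySem.List.pyRange 0 board_rows 1).foldl (fun b i =>
    (PySem.List.pyRange 0 board_cols 1).foldl (fun b j =>
      if (bishop_r - i).natAbs = (bishop_c - j).natAbs then
        if ¬ (i = bishop_r ∧ j = bishop_c) then
          let row := PySem.List.pyGetD b i []
          let cur := PySem.List.pyGetD row j ""
          let v := if ¬ (cur ∈ (["R", "Q", "P", "B"] : List String)) then "X" else cur
          PySem.List.pySetD b i (PySem.List.pySetD row j v)
        else b
      else b) b) new_board

-- ===== PORT B =====
def bishop_rewrite_alt (new_board : List (List String)) (bishop_r : Int) (bishop_c : Int) : List (List String) :=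
  let cols : Int := (PySem.List.pyGetD new_board 0 []).length
  let keep : PySem.Set String := PySem.Set.ofList ["R", "Q", "P", "B"]
  (PySem.List.enumerate new_board 0).map (fun p =>
    let i := p.1
    let row := p.2
    let d := i - bishop_r
    [bishop_c + d, bishop_c - d].foldl (fun r j =>
      if 0 ≤ j ∧ j < cols ∧ d ≠ 0 ∧ ¬ (PySem.List.pyGetD r j "" ∈ keep) then
        PySem.List.pySetD r j "X"
      else r) row)

-- ===== PRECONDITION & SPEC =====
-- Pre_ excludes exactly the inputs on which A raises IndexError: the empty board (A indexes
-- new_board[0] for the column count), and boards where the bishop's diagonal meets a cell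
-- (i, j) with j inside the first row's column range but beyond the end of the (shorter) row i,
-- which A reads and therefore raises on (B raises on exactly the same inputs).
def Pre_bishop_rewrite (new_board : List (List String)) (bishop_r : Int) (bishop_c : Int) : Prop :=
  new_board ≠ [] ∧ ∀ i : Nat, i < new_board.length → ∀ j : Nat, j < (new_board.headD []).length →
    (bishop_r - (i : Int)).natAbs = (bishop_c - (j : Int)).natAbs →
    ¬((i : Int) = bishop_r ∧ (j : Int) = bishop_c) → j < (new_board.getD i []).length
instance (new_board : List (List String)) (bishop_r : Int) (bishop_c : Int) : Decidable (Pre_bishop_rewrite new_board bishop_r bishop_c) := by unfold Pre_bishop_rewrite; infer_instance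
def pvWitness_bishop_rewrite : List (List String) × Int × Int :=
  ([[".", ".", "."], [".", "R", "."], ["k", ".", "."]], 0, 0)
def Spec_bishop_rewrite (new_board : List (List String)) (bishop_r : Int) (bishop_c : Int) (out : List (List String)) : Prop := out = bishop_rewrite_alt new_board bishop_r bishop_c
instance (new_board : List (List String)) (bishop_r : Int) (bishop_c : Int) (out : List (List String)) : Decidable (Spec_bishop_rewrite new_board bishop_r bishop_c out) := by unfold Spec_bishop_rewrite; infer_instance

-- ===== CLAIM (what is proved, stated in full; the proofs are below) =====
def Claim_equal_bishop_rewrite : Prop := ∀ (new_board : List (List String)) (bishop_r : Int) (bishop_c : Int), Dom_bishop_rewrite new_board bishop_r bishop_c → Pre_bishop_rewrite new_board bishop_r bishop_c → Spec_bishop_rewrite new_board bishop_r bishop_c (bishop_rewrite new_board bishop_r bishop_c)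

-- ===== LEMMAS AND PROOFS =====

-- the cell-wise effect both programs have on a board cell (i, j) holding v
def pvCell (br bc : Int) (i j : Nat) (v : String) : String :=
  if (br - (i : Int)).natAbs = (bc - (j : Int)).natAbs ∧ ¬((i : Int) = br ∧ (j : Int) = bc)
      ∧ ¬(v ∈ (["R", "Q", "P", "B"] : List String)) then "X" else v

-- a row with its cells of index < c rewritten
def pvTrunc (br bc : Int) (i c : Nat) (row : List String) : List String :=
  row.mapIdx (fun j v => if j < c then pvCell br bc i j v else v)

theorem pvTrunc_length (br bc : Int) (i c : Nat) (row : List String) :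
    (pvTrunc br bc i c row).length = row.length := by simp [pvTrunc]

theorem pvTrunc_zero (br bc : Int) (i : Nat) (row : List String) :
    pvTrunc br bc i 0 row = row := by
  apply List.ext_getElem <;> simp [pvTrunc]

theorem pvTrunc_getElem (br bc : Int) (i c k : Nat) (row : List String) (hk : k < row.length) :
    (pvTrunc br bc i c row)[k]'(by rw [pvTrunc_length]; exact hk) =
      if k < c then pvCell br bc i k row[k] else row[k] := by
  simp [pvTrunc]

theorem pvTrunc_succ (br bc : Int) (i c : Nat) (row : List String) (h : c < row.length) :
    pvTrunc br bc i (c + 1) row = (pvTrunc br bc i c row).set c (pvCell br bc i c row[c]) := by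
  apply List.ext_getElem (by simp [pvTrunc_length])
  intro k h1 h2
  rw [List.getElem_set]
  rw [List.length_set, pvTrunc_length] at h2
  rw [pvTrunc_getElem br bc i (c+1) k row h2, pvTrunc_getElem br bc i c k row h2]
  by_cases hck : c = k
  · subst hck; simp
  · have : (k < c + 1) ↔ (k < c) := by omega
    simp [hck, this]

-- stepping past an index whose cell the pass leaves unchanged (or which is off the row's end)
theorem pvTrunc_succ_id (br bc : Int) (i c : Nat) (row : List String)
    (h : ∀ hcl : c < row.length, pvCell br bc i c (row[c]'hcl) = row[c]'hcl) :
    pvTrunc br bc i (c + 1) row = pvTrunc br bc i c row := by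
  apply List.ext_getElem (by simp [pvTrunc_length])
  intro k h1 h2
  rw [pvTrunc_length] at h1
  rw [pvTrunc_getElem br bc i (c+1) k row h1, pvTrunc_getElem br bc i c k row h1]
  by_cases hck : c = k
  · subst hck
    rw [if_pos (by omega), h h1, if_neg (by omega)]
  · have : (k < c + 1) ↔ (k < c) := by omega
    simp only [this]

-- A's inner loop over columns touches only row i, rewriting its first c cells
theorem pv_innerA (br bc : Int) (b : List (List String)) (i : Int) (row : List String)
    (hi0 : 0 ≤ i) (hib : i.toNat < b.length) (hrow : b[i.toNat] = row)
    (c : Nat)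
    (hsafe : ∀ j : Nat, j < c → (br - i).natAbs = (bc - (j : Int)).natAbs →
      ¬(i = br ∧ (j : Int) = bc) → j < row.length) :
    (PySem.List.pyRange 0 (c : Int) 1).foldl
      (fun b j =>
        if (br - i).natAbs = (bc - j).natAbs then
          if ¬(i = br ∧ j = bc) then
            let r := PySem.List.pyGetD b i []
            let cur := PySem.List.pyGetD r j ""
            let v := if ¬(cur ∈ (["R", "Q", "P", "B"] : List String)) then "X" else cur
            PySem.List.pySetD b i (PySem.List.pySetD r j v)
          else b
        else b) b
    = b.set i.toNat (pvTrunc br bc i.toNat c row) := by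
  induction c with
  | zero =>
    rw [show ((0 : Nat) : Int) = 0 by norm_num,
        PySem.List.pyRange_one_eq_nil (by omega : (0 : Int) ≤ 0)]
    rw [pvTrunc_zero, ← hrow]
    exact (List.set_getElem_self hib).symm
  | succ c ih =>
    rw [show ((c + 1 : Nat) : Int) = (c : Int) + 1 by push_cast; ring,
        PySem.List.pyRange_one_succ_right (by omega), List.foldl_append,
        ih (fun j hj => hsafe j (by omega))]
    simp only [List.foldl_cons, List.foldl_nil]
    have hget : PySem.List.pyGetD (b.set i.toNat (pvTrunc br bc i.toNat c row)) i [] =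
        pvTrunc br bc i.toNat c row := by
      rw [PySem.List.pyGetD_eq_getElem _ _ hi0 (by rw [List.length_set]; omega)]
      simp
    simp only [hget]
    have hto : ((i.toNat : Int)) = i := Int.toNat_of_nonneg hi0
    split_ifs with hP1 hP2 hm
    · -- the bishop's own square: no write, and the pass keeps the value
      rw [pvTrunc_succ_id]
      intro hcl
      unfold pvCell
      rw [if_neg]
      rintro ⟨-, hB, -⟩
      exact hB ⟨by omega, by omega⟩
    · -- diagonal, protected piece: the write restores the value
      have hcl : c < row.length := hsafe c (by omega) hP1 hP2
      have hcell : PySem.List.pyGetD (pvTrunc br bc i.toNat c row) (c : Int) "" = row[c] := by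
        rw [PySem.List.pyGetD_eq_getElem _ _ (by omega)
          (by rw [pvTrunc_length]; exact_mod_cast hcl)]
        simp only [Int.toNat_natCast]
        rw [pvTrunc_getElem br bc i.toNat c c row hcl, if_neg (by omega)]
      rw [hcell] at hm ⊢
      rw [pvTrunc_succ br bc i.toNat c row hcl,
          PySem.List.pySetD_of_nonneg (pvTrunc br bc i.toNat c row) _
            (by omega : (0 : Int) ≤ (c : Int)), Int.toNat_natCast,
          PySem.List.pySetD_of_nonneg _ _ hi0, List.set_set]
      have hv : pvCell br bc i.toNat c row[c] = row[c] := by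
        unfold pvCell
        rw [if_neg]
        rintro ⟨-, -, h⟩
        exact h hm
      rw [hv]
    · -- diagonal, unprotected piece: the write puts 'X'
      have hcl : c < row.length := hsafe c (by omega) hP1 hP2
      have hcell : PySem.List.pyGetD (pvTrunc br bc i.toNat c row) (c : Int) "" = row[c] := by
        rw [PySem.List.pyGetD_eq_getElem _ _ (by omega)
          (by rw [pvTrunc_length]; exact_mod_cast hcl)]
        simp only [Int.toNat_natCast]
        rw [pvTrunc_getElem br bc i.toNat c c row hcl, if_neg (by omega)]
      rw [hcell] at hm
      rw [pvTrunc_succ br bc i.toNat c row hcl,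
          PySem.List.pySetD_of_nonneg (pvTrunc br bc i.toNat c row) _
            (by omega : (0 : Int) ≤ (c : Int)), Int.toNat_natCast,
          PySem.List.pySetD_of_nonneg _ _ hi0, List.set_set]
      have hv : pvCell br bc i.toNat c row[c] = "X" := by
        unfold pvCell
        rw [if_pos ⟨by omega, by simp only [hto]; exact hP2, by simpa using hm⟩]
      rw [hv]
    · -- off the diagonal: no write, and the pass keeps the value
      rw [pvTrunc_succ_id]
      intro hcl
      unfold pvCell
      rw [if_neg]
      rintro ⟨hA, -, -⟩
      exact hP1 (by omega)

-- A's outer loop rewrites the first r rows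
theorem pv_outerA (br bc : Int) (nb : List (List String)) (colsN : Nat)
    (hsafe : ∀ i : Nat, i < nb.length → ∀ j : Nat, j < colsN →
      (br - (i : Int)).natAbs = (bc - (j : Int)).natAbs →
      ¬((i : Int) = br ∧ (j : Int) = bc) → j < (nb.getD i []).length)
    (r : Nat) (hr : r ≤ nb.length) :
    (PySem.List.pyRange 0 (r : Int) 1).foldl
      (fun b i =>
        (PySem.List.pyRange 0 (colsN : Int) 1).foldl
          (fun b j =>
            if (br - i).natAbs = (bc - j).natAbs then
              if ¬(i = br ∧ j = bc) then
                let r := PySem.List.pyGetD b i []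
                let cur := PySem.List.pyGetD r j ""
                let v := if ¬(cur ∈ (["R", "Q", "P", "B"] : List String)) then "X" else cur
                PySem.List.pySetD b i (PySem.List.pySetD r j v)
              else b
            else b) b) nb
    = nb.mapIdx (fun i row => if i < r then pvTrunc br bc i colsN row else row) := by
  induction r with
  | zero =>
    rw [show ((0 : Nat) : Int) = 0 by norm_num,
        PySem.List.pyRange_one_eq_nil (by omega : (0 : Int) ≤ 0)]
    apply List.ext_getElem (by simp)
    intro k h1 h2
    simp
  | succ r ih =>
    have hr' : r ≤ nb.length := by omega
    have hrlt : r < nb.length := by omega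
    rw [show ((r + 1 : Nat) : Int) = (r : Int) + 1 by push_cast; ring,
        PySem.List.pyRange_one_succ_right (by omega), List.foldl_append, ih hr']
    simp only [List.foldl_cons, List.foldl_nil]
    have hcast : ((r : Int)).toNat = r := by omega
    have hib : ((r : Int)).toNat <
        (nb.mapIdx (fun i row => if i < r then pvTrunc br bc i colsN row else row)).length := by
      simpa [hcast] using hrlt
    have hrow : (nb.mapIdx (fun i row => if i < r then pvTrunc br bc i colsN row else row))[((r : Int)).toNat]'hib
        = nb[r]'hrlt := by
      simp [hcast]
    rw [pv_innerA br bc _ (r : Int) (nb[r]'hrlt) (by omega) hib hrow colsN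
        (by
          intro j hj hA hB
          have := hsafe r hrlt j hj (by omega) (by simpa using hB)
          rwa [List.getD_eq_getElem nb [] hrlt] at this)]
    apply List.ext_getElem (by simp)
    intro k h1 h2
    rw [List.getElem_set]
    simp only [List.length_set, List.length_mapIdx] at h1 h2 ⊢
    rw [List.getElem_mapIdx, List.getElem_mapIdx]
    by_cases hk : ((r : Int)).toNat = k
    · subst hk
      rw [if_pos (by omega)]
      simp [hcast]
    · rw [if_neg hk]
      by_cases hlt2 : k < r
      · rw [if_pos hlt2, if_pos (by omega)]
      · rw [if_neg hlt2, if_neg (by omega)]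

theorem pv_A_eq (nb : List (List String)) (br bc : Int) (h1 : nb ≠ [])
    (h2 : ∀ i : Nat, i < nb.length → ∀ j : Nat, j < (nb.headD []).length →
      (br - (i : Int)).natAbs = (bc - (j : Int)).natAbs →
      ¬((i : Int) = br ∧ (j : Int) = bc) → j < (nb.getD i []).length) :
    bishop_rewrite nb br bc = nb.mapIdx (fun i row => pvTrunc br bc i (nb.headD []).length row) := by
  have hhead : PySem.List.pyGetD nb 0 ([] : List String) = nb.headD [] := by
    rw [PySem.List.pyGetD_zero]
    cases nb with
    | nil => simp
    | cons a l => simp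
  unfold bishop_rewrite
  dsimp only []
  rw [hhead, pv_outerA br bc nb (nb.headD []).length h2 nb.length (le_refl _)]
  apply List.ext_getElem (by simp)
  intro k h1' h2'
  simp only [List.length_mapIdx] at h1'
  rw [List.getElem_mapIdx, List.getElem_mapIdx, if_pos h1']

-- B's per-row pass computes the same cells: at most the two diagonal columns
theorem pv_rowB (br bc : Int) (i : Nat) (row : List String) (colsN : Nat)
    (hsafe : ∀ j : Nat, j < colsN → (br - (i : Int)).natAbs = (bc - (j : Int)).natAbs →
      ¬((i : Int) = br ∧ (j : Int) = bc) → j < row.length) :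
    ([bc + ((i : Int) - br), bc - ((i : Int) - br)].foldl
      (fun r j =>
        if 0 ≤ j ∧ j < (colsN : Int) ∧ ((i : Int) - br) ≠ 0 ∧
            ¬(PySem.List.pyGetD r j "" ∈ PySem.Set.ofList ["R", "Q", "P", "B"]) then
          PySem.List.pySetD r j "X"
        else r) row)
    = pvTrunc br bc i colsN row := by
  simp only [List.foldl_cons, List.foldl_nil]
  by_cases hd : (i : Int) - br = 0
  · rw [if_neg (by rintro ⟨-, -, h, -⟩; exact h hd), if_neg (by rintro ⟨-, -, h, -⟩; exact h hd)]
    apply List.ext_getElem (by simp [pvTrunc_length])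
    intro k h1 h2
    rw [pvTrunc_getElem br bc i colsN k row h1]
    by_cases hkc : k < colsN
    · rw [if_pos hkc]
      unfold pvCell
      rw [if_neg]
      rintro ⟨hA, hB, -⟩
      exact hB ⟨by omega, by omega⟩
    · rw [if_neg hkc]
  · apply List.ext_getElem?
    intro k
    split_ifs with hc1 hc2 hc2
    · -- both diagonal columns written
      simp only [pvTrunc, List.getElem?_mapIdx]
      have hl1 : (bc + ((i : Int) - br)).toNat < row.length :=
        hsafe _ (by omega) (by omega) (by rintro ⟨h, -⟩; exact hd (by omega))
      have hl2 : (bc - ((i : Int) - br)).toNat < row.length :=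
        hsafe _ (by omega) (by omega) (by rintro ⟨h, -⟩; exact hd (by omega))
      simp only [PySem.List.pySetD_of_nonneg row "X" hc1.1] at hc2 ⊢
      simp only [PySem.List.pySetD_of_nonneg
        (row.set (bc + ((i : Int) - br)).toNat "X") "X" hc2.1]
      obtain ⟨hb0, hb1, -, hmem2⟩ := hc2
      rw [PySem.List.pyGetD_eq_getElem _ "" hb0 (by simp only [List.length_set]; omega)] at hmem2
      simp only [List.getElem_set] at hmem2
      obtain ⟨ha0, ha1, -, hmem1⟩ := hc1
      rw [if_neg (by omega)] at hmem2
      rw [PySem.List.pyGetD_eq_getElem row "" ha0 (by omega)] at hmem1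
      simp only [List.getElem?_set, List.length_set]
      by_cases hk1 : (k : Int) = bc + ((i : Int) - br)
      · rw [if_neg (by omega), if_pos (by omega : (bc + ((i : Int) - br)).toNat = k),
            if_pos (by omega), List.getElem?_eq_getElem (show k < row.length by omega),
            Option.map_some]
        have hkk : (bc + ((i : Int) - br)).toNat = k := by omega
        simp only [hkk] at hmem1
        rw [if_pos (by omega)]
        unfold pvCell
        rw [if_pos ⟨by omega, by rintro ⟨h, -⟩; exact hd (by omega),
              by simpa [PySem.Set.mem_ofList] using hmem1⟩]
      · by_cases hk2 : (k : Int) = bc - ((i : Int) - br)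
        · rw [if_pos (by omega : (bc - ((i : Int) - br)).toNat = k), if_pos (by omega),
              List.getElem?_eq_getElem (show k < row.length by omega), Option.map_some]
          have hkk : (bc - ((i : Int) - br)).toNat = k := by omega
          simp only [hkk] at hmem2
          rw [if_pos (by omega)]
          unfold pvCell
          rw [if_pos ⟨by omega, by rintro ⟨h, -⟩; exact hd (by omega),
                by simpa [PySem.Set.mem_ofList] using hmem2⟩]
        · rw [if_neg (by omega), if_neg (by omega)]
          by_cases hk : k < row.length
          · rw [List.getElem?_eq_getElem hk, Option.map_some]
            by_cases hkc : k < colsN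
            · rw [if_pos hkc]
              unfold pvCell
              rw [if_neg]
              rintro ⟨hA, -, -⟩
              exact absurd hA (by omega)
            · rw [if_neg hkc]
          · rw [List.getElem?_eq_none (by omega), Option.map_none]
    · -- only column bc+d written
      simp only [pvTrunc, List.getElem?_mapIdx]
      have hl1 : (bc + ((i : Int) - br)).toNat < row.length :=
        hsafe _ (by omega) (by omega) (by rintro ⟨h, -⟩; exact hd (by omega))
      simp only [PySem.List.pySetD_of_nonneg row "X" hc1.1] at hc2 ⊢
      obtain ⟨ha0, ha1, -, hmem1⟩ := hc1
      rw [PySem.List.pyGetD_eq_getElem row "" ha0 (by omega)] at hmem1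
      simp only [List.getElem?_set]
      by_cases hk1 : (k : Int) = bc + ((i : Int) - br)
      · rw [if_pos (by omega : (bc + ((i : Int) - br)).toNat = k), if_pos (by omega),
            List.getElem?_eq_getElem (show k < row.length by omega), Option.map_some]
        have hkk : (bc + ((i : Int) - br)).toNat = k := by omega
        simp only [hkk] at hmem1
        rw [if_pos (by omega)]
        unfold pvCell
        rw [if_pos ⟨by omega, by rintro ⟨h, -⟩; exact hd (by omega),
              by simpa [PySem.Set.mem_ofList] using hmem1⟩]
      · rw [if_neg (by omega)]
        by_cases hk : k < row.length
        · rw [List.getElem?_eq_getElem hk, Option.map_some]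
          by_cases hkc : k < colsN
          · rw [if_pos hkc]
            by_cases hk2 : (k : Int) = bc - ((i : Int) - br)
            · unfold pvCell
              rw [if_neg]
              rintro ⟨-, -, hm⟩
              apply hc2
              refine ⟨by omega, by omega, hd, ?_⟩
              rw [PySem.List.pyGetD_eq_getElem _ "" (by omega) (by simp only [List.length_set]; omega)]
              simp only [List.getElem_set]
              rw [if_neg (by omega)]
              have hkk : (bc - ((i : Int) - br)).toNat = k := by omega
              simp only [hkk]
              simpa [PySem.Set.mem_ofList] using hm
            · unfold pvCell
              rw [if_neg]
              rintro ⟨hA, -, -⟩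
              exact absurd hA (by omega)
          · rw [if_neg hkc]
        · rw [List.getElem?_eq_none (by omega), Option.map_none]
    · -- only column bc-d written
      simp only [pvTrunc, List.getElem?_mapIdx]
      have hl2 : (bc - ((i : Int) - br)).toNat < row.length :=
        hsafe _ (by omega) (by omega) (by rintro ⟨h, -⟩; exact hd (by omega))
      simp only [PySem.List.pySetD_of_nonneg row "X" hc2.1]
      obtain ⟨hb0, hb1, -, hmem2⟩ := hc2
      rw [PySem.List.pyGetD_eq_getElem row "" hb0 (by omega)] at hmem2
      simp only [List.getElem?_set]
      by_cases hk2 : (k : Int) = bc - ((i : Int) - br)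
      · rw [if_pos (by omega : (bc - ((i : Int) - br)).toNat = k), if_pos (by omega),
            List.getElem?_eq_getElem (show k < row.length by omega), Option.map_some]
        have hkk : (bc - ((i : Int) - br)).toNat = k := by omega
        simp only [hkk] at hmem2
        rw [if_pos (by omega)]
        unfold pvCell
        rw [if_pos ⟨by omega, by rintro ⟨h, -⟩; exact hd (by omega),
              by simpa [PySem.Set.mem_ofList] using hmem2⟩]
      · rw [if_neg (by omega)]
        by_cases hk : k < row.length
        · rw [List.getElem?_eq_getElem hk, Option.map_some]
          by_cases hkc : k < colsN
          · rw [if_pos hkc]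
            by_cases hk1 : (k : Int) = bc + ((i : Int) - br)
            · unfold pvCell
              rw [if_neg]
              rintro ⟨-, -, hm⟩
              apply hc1
              refine ⟨by omega, by omega, hd, ?_⟩
              rw [PySem.List.pyGetD_eq_getElem row "" (by omega) (by omega)]
              have hkk : (bc + ((i : Int) - br)).toNat = k := by omega
              simp only [hkk]
              simpa [PySem.Set.mem_ofList] using hm
            · unfold pvCell
              rw [if_neg]
              rintro ⟨hA, -, -⟩
              exact absurd hA (by omega)
          · rw [if_neg hkc]
        · rw [List.getElem?_eq_none (by omega), Option.map_none]
    · -- no diagonal column inside the column range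
      simp only [pvTrunc, List.getElem?_mapIdx]
      by_cases hk : k < row.length
      · rw [List.getElem?_eq_getElem hk, Option.map_some]
        by_cases hkc : k < colsN
        · rw [if_pos hkc]
          by_cases hk1 : (k : Int) = bc + ((i : Int) - br)
          · unfold pvCell
            rw [if_neg]
            rintro ⟨-, -, hm⟩
            apply hc1
            refine ⟨by omega, by omega, hd, ?_⟩
            rw [PySem.List.pyGetD_eq_getElem row "" (by omega) (by omega)]
            have hkk : (bc + ((i : Int) - br)).toNat = k := by omega
            simp only [hkk]
            simpa [PySem.Set.mem_ofList] using hm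
          · by_cases hk2 : (k : Int) = bc - ((i : Int) - br)
            · unfold pvCell
              rw [if_neg]
              rintro ⟨-, -, hm⟩
              apply hc2
              refine ⟨by omega, by omega, hd, ?_⟩
              rw [PySem.List.pyGetD_eq_getElem row "" (by omega) (by omega)]
              have hkk : (bc - ((i : Int) - br)).toNat = k := by omega
              simp only [hkk]
              simpa [PySem.Set.mem_ofList] using hm
            · unfold pvCell
              rw [if_neg]
              rintro ⟨hA, -, -⟩
              exact absurd hA (by omega)
        · rw [if_neg hkc]
      · rw [List.getElem?_eq_none (by omega : row.length ≤ k), Option.map_none]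

theorem pv_B_eq (nb : List (List String)) (br bc : Int) (h1 : nb ≠ [])
    (h2 : ∀ i : Nat, i < nb.length → ∀ j : Nat, j < (nb.headD []).length →
      (br - (i : Int)).natAbs = (bc - (j : Int)).natAbs →
      ¬((i : Int) = br ∧ (j : Int) = bc) → j < (nb.getD i []).length) :
    bishop_rewrite_alt nb br bc = nb.mapIdx (fun i row => pvTrunc br bc i (nb.headD []).length row) := by
  have hhead : PySem.List.pyGetD nb 0 ([] : List String) = nb.headD [] := by
    rw [PySem.List.pyGetD_zero]
    cases nb with
    | nil => simp
    | cons a l => simp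
  unfold bishop_rewrite_alt
  dsimp only []
  rw [hhead]
  apply List.ext_getElem (by simp [PySem.List.length_enumerate])
  intro k hk1 hk2
  simp only [List.length_mapIdx] at hk2
  simp only [List.getElem_map, PySem.List.getElem_enumerate, zero_add, List.getElem_mapIdx]
  rw [pv_rowB br bc k (nb[k]'hk2) (nb.headD []).length
    (by
      intro j hj hA hB
      have := h2 k hk2 j hj hA hB
      rwa [List.getD_eq_getElem nb [] hk2] at this)]

-- ===== VERDICT (by name: the statement is the Claim_ definition above) =====
theorem bishop_rewrite_spec : Claim_equal_bishop_rewrite := by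
  intro nb br bc _ hpre
  unfold Spec_bishop_rewrite
  rw [pv_A_eq nb br bc hpre.1 hpre.2, pv_B_eq nb br bc hpre.1 hpre.2]
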